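-- pv_equiv track=rewrite | github.com/Basudeb21/virtual-ai-creator | services/caption_generator.py | extract_caption_only
-- ===== SOURCE A (Python) =====
-- def extract_caption_only(text):
--     lines = text.strip().split("\n")
--     for line in reversed(lines):
--         if line.strip() and "#" in line:
--             return line.strip().strip('"').strip("'")
--     for line in reversed(lines):
--         if line.strip():
--             return line.strip().strip('"').strip("'")
--     return text.strip().strip('"').strip("'")
-- ===== SOURCE B (Python) =====
-- def extract_caption_only(text):
--     last_hash = None
--     last_nonempty = None
--     for line in text.strip().split("\n"):
--         if line.strip():
--             last_nonempty = line
--             if "#" in line: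
--                 last_hash = line
--     chosen = last_hash if last_hash is not None else last_nonempty
--     if chosen is not None:
--         return chosen.strip().strip('"').strip("'")
--     return text.strip().strip('"').strip("'")
-- ===== Notes on version B (the rewrite author's own statement) =====
-- stated objective: alternative
-- what changed: Replaces A's two separate reversed scans (hashtag line, then any non-empty line) by a single forward pass that maintains the last hashtag-bearing line and the last non-empty line simultaneously, then picks and cleans one candidate.
import Mathlib
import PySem

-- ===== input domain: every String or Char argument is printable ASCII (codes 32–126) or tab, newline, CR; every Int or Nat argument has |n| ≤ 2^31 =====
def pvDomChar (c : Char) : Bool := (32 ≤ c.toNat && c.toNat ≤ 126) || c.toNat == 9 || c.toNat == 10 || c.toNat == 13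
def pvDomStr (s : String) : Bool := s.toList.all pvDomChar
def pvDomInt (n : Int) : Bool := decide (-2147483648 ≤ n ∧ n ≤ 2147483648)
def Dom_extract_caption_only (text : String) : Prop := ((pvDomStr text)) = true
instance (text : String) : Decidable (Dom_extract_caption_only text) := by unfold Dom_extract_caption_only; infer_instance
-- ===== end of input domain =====

-- B replaces A's two reversed scans by one forward pass keeping both candidates; same cost (objective: alternative).

-- shared cleaning chain  s.strip().strip('"').strip("'")
def pvClean (s : String) : String :=
  PySem.Str.stripChars (PySem.Str.stripChars (PySem.Str.strip s) "\"") "'"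

-- ===== PORT A =====
-- first reversed loop: returns the cleaned line if it is non-empty after strip and contains '#'
def pvLoop1 : List String → Option String
  | [] => none
  | l :: rest =>
    if PySem.Str.strip l ≠ "" ∧ PySem.Str.isIn "#" l = true then some (pvClean l) else pvLoop1 rest

-- second reversed loop: returns the cleaned line if it is non-empty after strip
def pvLoop2 : List String → Option String
  | [] => none
  | l :: rest =>
    if PySem.Str.strip l ≠ "" then some (pvClean l) else pvLoop2 rest

def extract_caption_only (text : String) : String :=
  let lines := (PySem.Str.split? (PySem.Str.strip text) "\n").getD []
  match pvLoop1 lines.reverse with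
  | some r => r
  | none =>
    match pvLoop2 lines.reverse with
    | some r => r
    | none => pvClean text

-- ===== PORT B =====
-- one forward pass: state = (last hashtag-bearing non-empty line, last non-empty line)
def pvStep (acc : Option String × Option String) (line : String) : Option String × Option String :=
  if PySem.Str.strip line ≠ "" then
    ((if PySem.Str.isIn "#" line = true then some line else acc.1), some line)
  else acc

def extract_caption_only_alt (text : String) : String :=
  let lines := (PySem.Str.split? (PySem.Str.strip text) "\n").getD []
  let st := lines.foldl pvStep (none, none)
  match (match st.1 with | some h => some h | none => st.2) with
  | some c => pvClean c
  | none => pvClean text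

-- ===== PRECONDITION & SPEC =====
def Spec_extract_caption_only (text : String) (out : String) : Prop := out = extract_caption_only_alt text
instance (text : String) (out : String) : Decidable (Spec_extract_caption_only text out) := by unfold Spec_extract_caption_only; infer_instance

-- ===== CLAIM (what is proved, stated in full; the proofs are below) =====
def Claim_equal_extract_caption_only : Prop := ∀ (text : String), Dom_extract_caption_only text → Spec_extract_caption_only text (extract_caption_only text)

-- ===== LEMMAS AND PROOFS =====
def pvP1 (l : String) : Bool := decide (PySem.Str.strip l ≠ "") && PySem.Str.isIn "#" l
def pvP2 (l : String) : Bool := decide (PySem.Str.strip l ≠ "")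

theorem pvLoop1_eq_find (xs : List String) :
    pvLoop1 xs = (xs.find? pvP1).map pvClean := by
  induction xs with
  | nil => rfl
  | cons l rest ih =>
    simp only [pvLoop1, List.find?, pvP1]
    by_cases h1 : PySem.Str.strip l ≠ ""
    · cases h2 : PySem.Chars.isIn ['#'] l.toList <;> simp [h1, h2, ih]
    · simp [h1, ih]

theorem pvLoop2_eq_find (xs : List String) :
    pvLoop2 xs = (xs.find? pvP2).map pvClean := by
  induction xs with
  | nil => rfl
  | cons l rest ih =>
    simp only [pvLoop2, List.find?, pvP2]
    by_cases h1 : PySem.Str.strip l ≠ "" <;> simp [h1, ih]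

theorem pvFoldl_eq_find (xs : List String) (h0 n0 : Option String) :
    xs.foldl pvStep (h0, n0) =
      ((xs.reverse.find? pvP1).elim h0 some, (xs.reverse.find? pvP2).elim n0 some) := by
  induction xs generalizing h0 n0 with
  | nil => rfl
  | cons l rest ih =>
    simp only [List.foldl_cons, List.reverse_cons, List.find?_append, ih]
    have hstep : pvStep (h0, n0) l =
        ((if pvP1 l then some l else h0), (if pvP2 l then some l else n0)) := by
      simp only [pvStep, pvP1, pvP2]
      by_cases h1 : PySem.Str.strip l ≠ ""
      · cases h2 : PySem.Chars.isIn ['#'] l.toList <;> simp [h1, h2]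
      · simp [h1]
    rw [hstep]
    cases hf1 : rest.reverse.find? pvP1 <;> cases hf2 : rest.reverse.find? pvP2 <;>
      by_cases h1 : pvP1 l = true <;> by_cases h2 : pvP2 l = true <;>
        simp [List.find?, h1, h2, Option.elim]

-- ===== VERDICT (by name: the statement is the Claim_ definition above) =====
theorem extract_caption_only_spec : Claim_equal_extract_caption_only := by
  intro text _
  unfold Spec_extract_caption_only extract_caption_only extract_caption_only_alt
  simp only [pvFoldl_eq_find, pvLoop1_eq_find, pvLoop2_eq_find]
  cases hf1 : ((PySem.Str.split? (PySem.Str.strip text) "\n").getD []).reverse.find? pvP1 <;>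
    cases hf2 : ((PySem.Str.split? (PySem.Str.strip text) "\n").getD []).reverse.find? pvP2 <;>
      simp [Option.elim]
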